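-- pv_equiv track=rewrite | github.com/tiagodalloca/lab-mc102 | lab16/thomas.py | linksResposta
-- ===== SOURCE A (Python) =====
-- def linksResposta(links,resp):
--     numLinks = []
--
--     for i in range(len(links)):
--      if(resp[i] == 1):
--       qtde = 0
--       for j in range(len(links)):
--        if(resp[j] != 0 and links[j][i] == 1):
--         qtde += 1
--
--       numLinks.append(qtde)
--
--      else:
--       numLinks.append(-1)
--
--     return numLinks
-- ===== SOURCE B (Python) =====
-- def linksResposta(links, resp):
--     n = len(links)
--     counts = [0] * n
--     for j in range(n):
--         if resp[j] != 0:
--             row = links[j]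
--             for i in range(n):
--                 if resp[i] == 1 and row[i] == 1:
--                     counts[i] += 1
--     return [counts[i] if resp[i] == 1 else -1 for i in range(n)]
-- ===== Notes on version B (the rewrite author's own statement) =====
-- stated objective: alternative
-- what changed: A rescans all rows once per answer column (column-major nested scan with per-column accumulator); B makes one row-major accumulation pass into a counts array over active rows, then a separate emit pass placing counts or -1.
import Mathlib
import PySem

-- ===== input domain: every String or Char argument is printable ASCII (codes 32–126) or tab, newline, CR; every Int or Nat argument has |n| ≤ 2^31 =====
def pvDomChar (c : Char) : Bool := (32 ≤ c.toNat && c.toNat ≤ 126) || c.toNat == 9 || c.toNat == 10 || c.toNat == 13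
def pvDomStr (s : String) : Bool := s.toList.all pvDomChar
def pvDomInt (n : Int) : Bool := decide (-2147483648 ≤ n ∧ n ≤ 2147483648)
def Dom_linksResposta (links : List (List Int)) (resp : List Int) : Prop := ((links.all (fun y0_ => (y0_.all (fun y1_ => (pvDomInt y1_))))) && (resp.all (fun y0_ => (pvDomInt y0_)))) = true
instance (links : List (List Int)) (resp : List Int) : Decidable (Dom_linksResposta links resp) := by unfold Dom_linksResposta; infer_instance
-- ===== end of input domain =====

-- B replaces A's per-column rescanning (column-major nested scan) by one row-major
-- accumulation pass into a counts array over active rows plus a separate emit pass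
-- (alternative decomposition, same asymptotic cost).


-- ===== PORT A =====
def linksResposta (links : List (List Int)) (resp : List Int) : List Int :=
  (List.range links.length).foldl (fun numLinks (i : Nat) =>
    if PySem.List.pyGetD resp (i : Int) 0 == 1 then
      let qtde : Int := (List.range links.length).foldl (fun q (j : Nat) =>
        if (PySem.List.pyGetD resp (j : Int) 0 != 0) &&
           (PySem.List.pyGetD (PySem.List.pyGetD links (j : Int) []) (i : Int) 0 == 1)
        then q + 1 else q) 0
      numLinks ++ [qtde]
    else
      numLinks ++ [-1]) []

-- ===== PORT B =====
def linksResposta_alt (links : List (List Int)) (resp : List Int) : List Int :=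
  let n := links.length
  let counts : List Int :=
    (List.range n).foldl (fun counts (j : Nat) =>
      if PySem.List.pyGetD resp (j : Int) 0 != 0 then
        let row := PySem.List.pyGetD links (j : Int) []
        (List.range n).foldl (fun c (i : Nat) =>
          if (PySem.List.pyGetD resp (i : Int) 0 == 1) &&
             (PySem.List.pyGetD row (i : Int) 0 == 1) then
            PySem.List.pySetD c (i : Int) (PySem.List.pyGetD c (i : Int) 0 + 1)
          else c) counts
      else counts) (List.replicate n 0)
  (List.range n).map (fun (i : Nat) =>
    if PySem.List.pyGetD resp (i : Int) 0 == 1 then PySem.List.pyGetD counts (i : Int) 0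
    else -1)

-- ===== PRECONDITION & SPEC =====
-- Pre_ excludes exactly the inputs where Python A raises an IndexError:
-- resp shorter than links, or an accessed row links[j] too short at an active column i.
def Pre_linksResposta (links : List (List Int)) (resp : List Int) : Prop :=
  links.length ≤ resp.length ∧
  ∀ i < links.length, resp.getD i 0 = 1 →
    ∀ j < links.length, resp.getD j 0 ≠ 0 → i < (links.getD j []).length
instance (links : List (List Int)) (resp : List Int) : Decidable (Pre_linksResposta links resp) := by
  unfold Pre_linksResposta; infer_instance

def pvWitness_linksResposta : List (List Int) × List Int := ([[1, 0], [0, 1]], [1, 1])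

def Spec_linksResposta (links : List (List Int)) (resp : List Int) (out : List Int) : Prop := out = linksResposta_alt links resp
instance (links : List (List Int)) (resp : List Int) (out : List Int) : Decidable (Spec_linksResposta links resp out) := by unfold Spec_linksResposta; infer_instance

-- ===== CLAIM (what is proved, stated in full; the proofs are below) =====
def Claim_equal_linksResposta : Prop := ∀ (links : List (List Int)) (resp : List Int), Dom_linksResposta links resp → Pre_linksResposta links resp → Spec_linksResposta links resp (linksResposta links resp)

-- ===== LEMMAS AND PROOFS =====
theorem pv_getD_set (l : List Int) (i : Nat) (a : Int) (j : Nat) :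
    (l.set i a).getD j 0 = if i = j ∧ i < l.length then a else l.getD j 0 := by
  simp only [List.getD_eq_getElem?_getD, List.getElem?_set]
  split_ifs <;> simp_all <;> omega

theorem pv_len_inner (p : Nat → Bool) (L : List Nat) (c : List Int) :
    (L.foldl (fun c k => if p k then c.set k (c.getD k 0 + 1) else c) c).length = c.length := by
  induction L generalizing c with
  | nil => rfl
  | cons x L ih =>
    simp only [List.foldl_cons]
    split
    · rw [ih, List.length_set]
    · exact ih c

theorem pv_inner_getD (p : Nat → Bool) (i : Nat) (L : List Nat) (hL : L.Nodup) (c : List Int) :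
    (L.foldl (fun c k => if p k then c.set k (c.getD k 0 + 1) else c) c).getD i 0
      = c.getD i 0 + (if i ∈ L ∧ p i ∧ i < c.length then 1 else 0) := by
  induction L generalizing c with
  | nil => simp
  | cons a L ih =>
    obtain ⟨ha, hL'⟩ := List.nodup_cons.mp hL
    simp only [List.foldl_cons]
    by_cases hpa : p a
    · rw [if_pos hpa, ih hL']
      simp only [List.length_set, pv_getD_set, List.mem_cons]
      by_cases hia : a = i
      · subst hia
        split_ifs <;> simp_all <;> omega
      · split_ifs <;> simp_all <;> omega
    · rw [if_neg hpa, ih hL']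
      simp only [List.mem_cons]
      congr 1
      apply if_congr _ rfl rfl
      have hne : i = a → ¬ p i = true := by rintro rfl; exact hpa
      tauto

-- outer accumulation: value of counts[i] after processing rows J
theorem pv_outer_getD (links : List (List Int)) (resp : List Int) (i : Nat)
    (hi : i < links.length) (J : List Nat) (c : List Int) (hc : c.length = links.length) :
    (J.foldl (fun c j => if (resp.getD j 0 != 0) then
        (List.range links.length).foldl (fun c k =>
          if ((resp.getD k 0 == 1) && ((links.getD j []).getD k 0 == 1)) then
            c.set k (c.getD k 0 + 1) else c) c
      else c) c).getD i 0
    = c.getD i 0 + (J.countP (fun j => (resp.getD j 0 != 0) && (resp.getD i 0 == 1) &&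
        ((links.getD j []).getD i 0 == 1)) : Int) := by
  induction J generalizing c with
  | nil => simp
  | cons j J ih =>
    simp only [List.foldl_cons, List.countP_cons]
    by_cases hj : (resp.getD j 0 != 0) = true
    · rw [if_pos hj,
        ih _ (by rw [pv_len_inner]; exact hc)]
      rw [pv_inner_getD _ i _ (List.nodup_range) c]
      simp only [List.mem_range, hi, hc, true_and, hj, Bool.true_and]
      push_cast
      split_ifs <;> simp_all <;> ring
    · rw [if_neg hj, ih _ hc]
      have hf : resp.getD j 0 = 0 := by simpa using hj
      rw [List.getD_eq_getElem?_getD] at hf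
      simp [hf]

theorem pv_A_eq (links : List (List Int)) (resp : List Int) :
    linksResposta links resp =
      (List.range links.length).map (fun i => if resp.getD i 0 == 1 then
        ((List.range links.length).countP (fun j => (resp.getD j 0 != 0) &&
          ((links.getD j []).getD i 0 == 1)) : Int) else -1) := by
  unfold linksResposta
  simp only [PySem.List.pyGetD_natCast]
  rw [PySem.List.foldl_congr_mem _ _
      (fun acc i => acc ++ [if resp.getD i 0 == 1 then
        ((List.range links.length).foldl (fun q j => if ((resp.getD j 0 != 0) &&
          ((links.getD j []).getD i 0 == 1)) then q + 1 else q) 0) else -1]) _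
      (by intro acc x _; split <;> (rename_i h; simp only [beq_iff_eq, List.getD_eq_getElem?_getD] at h; simp [h]))]
  rw [PySem.List.foldl_append_singleton_eq_map, List.nil_append]
  simp only [PySem.List.foldl_count_if, zero_add]

theorem pv_B_eq (links : List (List Int)) (resp : List Int) :
    linksResposta_alt links resp =
      (List.range links.length).map (fun i => if resp.getD i 0 == 1 then
        ((List.range links.length).countP (fun j => (resp.getD j 0 != 0) &&
          ((links.getD j []).getD i 0 == 1)) : Int) else -1) := by
  unfold linksResposta_alt
  simp only [PySem.List.pyGetD_natCast, PySem.List.pySetD_natCast]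
  apply List.map_congr_left
  intro i hi
  rw [List.mem_range] at hi
  by_cases hri : (resp.getD i 0 == 1) = true
  · rw [if_pos hri, if_pos hri]
    rw [pv_outer_getD links resp i hi _ _ (by simp)]
    rw [List.countP_congr (fun j _ => by rw [hri, Bool.and_true])]
    simp
  · rw [if_neg hri, if_neg hri]

-- ===== VERDICT (by name: the statement is the Claim_ definition above) =====
theorem linksResposta_spec : Claim_equal_linksResposta := by
  intro links resp _ _
  unfold Spec_linksResposta
  rw [pv_A_eq, pv_B_eq]
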